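-- pv_equiv track=rewrite | github.com/benabdel1u/biblical-scripts | sefaria_merge_v16_bert.py | expand_aliases_for_root
-- ===== SOURCE A (Python) =====
-- ROOT_ALIASES = {
--     'HRH': {'BVN'},
--     'NTN': {'CLM'},
--     'RDH': {'CLV'},
--     'MCL': {'CLV'},
--     'CLV': {'CLV', 'MCL', 'RDH'},
--     'BW>': {'>TJ'},
--     'NWX': {'CBQ'},
-- }
--
-- def expand_aliases_for_root(root):
--     aliases = set()
--     if root in ROOT_ALIASES:
--         aliases |= set(ROOT_ALIASES[root])
--     for k, v in ROOT_ALIASES.items():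
--         if root in v:
--             aliases.add(k)
--             aliases |= set(v)
--     aliases.add(root)
--     return aliases
-- ===== SOURCE B (Python) =====
-- ROOT_ALIASES = {
--     'HRH': {'BVN'},
--     'NTN': {'CLM'},
--     'RDH': {'CLV'},
--     'MCL': {'CLV'},
--     'CLV': {'CLV', 'MCL', 'RDH'},
--     'BW>': {'>TJ'},
--     'NWX': {'CBQ'},
-- }
--
-- # One-time expansion index: _EXP[w] = full alias set of w; forward pass then reverse pass.
-- _EXP = {}
-- for _k, _v in ROOT_ALIASES.items():
--     _EXP.setdefault(_k, set()).update(_v)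
-- for _k, _v in ROOT_ALIASES.items():
--     for _x in _v:
--         _s = _EXP.setdefault(_x, set())
--         _s.add(_k)
--         _s.update(_v)
--
-- def expand_aliases_for_root(root):
--     return set(_EXP.get(root, set())) | {root}
-- ===== Notes on version B (the rewrite author's own statement) =====
-- stated objective: faster
-- what changed: Replaces A's per-call forward lookup plus full reverse scan of ROOT_ALIASES by a module-level precomputed expansion table _EXP built once, so each call is a single dict lookup plus a set copy.
import Mathlib
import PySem

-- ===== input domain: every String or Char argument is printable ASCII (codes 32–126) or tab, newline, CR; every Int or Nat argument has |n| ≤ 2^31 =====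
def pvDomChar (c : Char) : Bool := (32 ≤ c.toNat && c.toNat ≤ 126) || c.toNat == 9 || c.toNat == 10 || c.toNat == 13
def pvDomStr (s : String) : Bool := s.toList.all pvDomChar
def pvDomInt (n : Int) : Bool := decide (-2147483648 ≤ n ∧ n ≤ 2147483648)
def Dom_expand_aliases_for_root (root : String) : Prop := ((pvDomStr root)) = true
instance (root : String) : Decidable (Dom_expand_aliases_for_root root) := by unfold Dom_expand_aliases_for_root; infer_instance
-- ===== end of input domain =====

-- B replaces A's per-call forward lookup + reverse scan of ROOT_ALIASES by a one-time
-- precomputed expansion table with a single lookup per call (objective: faster mechanism;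
-- timing on this tiny fixed table is below measurement resolution).

-- shared module constant ROOT_ALIASES (values are Python sets, kept in literal order)
def rootAliasesTbl : PySem.Dict String (PySem.Set String) :=
  PySem.Dict.ofList
    [ ("HRH", ["BVN"]), ("NTN", ["CLM"]), ("RDH", ["CLV"]), ("MCL", ["CLV"])
    , ("CLV", ["CLV", "MCL", "RDH"]), ("BW>", [">TJ"]), ("NWX", ["CBQ"]) ]

-- ===== PORT A =====
def expand_aliases_for_root (root : String) : List String :=
  let aliases : PySem.Set String := PySem.Set.empty
  let aliases :=
    if rootAliasesTbl.contains root then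
      PySem.Set.union aliases (rootAliasesTbl.getD root PySem.Set.empty)
    else aliases
  let aliases := rootAliasesTbl.items.foldl
    (fun a kv => if PySem.Set.contains kv.2 root
                 then PySem.Set.update (PySem.Set.add a kv.1) kv.2
                 else a) aliases
  PySem.Set.add aliases root

-- ===== PORT B =====
-- one-time expansion table _EXP : forward pass, then reverse pass (as in Source B)
def expTbl : PySem.Dict String (PySem.Set String) :=
  let d := rootAliasesTbl.items.foldl
    (fun d kv => d.insert kv.1 (PySem.Set.update (d.getD kv.1 PySem.Set.empty) kv.2))
    PySem.Dict.empty
  rootAliasesTbl.items.foldl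
    (fun d kv => kv.2.foldl
      (fun d x =>
        d.insert x (PySem.Set.update (PySem.Set.add (d.getD x PySem.Set.empty) kv.1) kv.2))
      d) d

def expand_aliases_for_root_alt (root : String) : List String :=
  PySem.Set.union (PySem.Set.ofList (expTbl.getD root PySem.Set.empty)) [root]

-- ===== PRECONDITION & SPEC =====
def Spec_expand_aliases_for_root (root : String) (out : List String) : Prop := out = expand_aliases_for_root_alt root
instance (root : String) (out : List String) : Decidable (Spec_expand_aliases_for_root root out) := by unfold Spec_expand_aliases_for_root; infer_instance

-- ===== CLAIM (what is proved, stated in full; the proofs are below) =====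
def Claim_equal_expand_aliases_for_root : Prop := ∀ (root : String), Dom_expand_aliases_for_root root → Spec_expand_aliases_for_root root (expand_aliases_for_root root)

-- ===== LEMMAS AND PROOFS =====

-- all strings occurring in the table (keys or value elements)
def pvRelevant : List String :=
  ["HRH", "NTN", "RDH", "MCL", "CLV", "BW>", "NWX", "BVN", "CLM", ">TJ", "CBQ"]

theorem pv_generic (root : String) (h : root ∉ pvRelevant) :
    expand_aliases_for_root root = expand_aliases_for_root_alt root := by
  simp only [pvRelevant, List.mem_cons, List.not_mem_nil, or_false, not_or] at h
  obtain ⟨h1, h2, h3, h4, h5, h6, h7, h8, h9, h10, h11⟩ := h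
  have hR : rootAliasesTbl = ⟨[ ("HRH", ["BVN"]), ("NTN", ["CLM"]), ("RDH", ["CLV"]), ("MCL", ["CLV"])
    , ("CLV", ["CLV", "MCL", "RDH"]), ("BW>", [">TJ"]), ("NWX", ["CBQ"]) ]⟩ := by rfl
  have hE : expTbl = ⟨[("HRH", ["BVN"]), ("NTN", ["CLM"]), ("RDH", ["CLV", "MCL", "RDH"]),
    ("MCL", ["CLV", "MCL", "RDH"]), ("CLV", ["CLV", "MCL", "RDH"]), ("BW>", [">TJ"]),
    ("NWX", ["CBQ"]), ("BVN", ["HRH", "BVN"]), ("CLM", ["NTN", "CLM"]),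
    (">TJ", ["BW>", ">TJ"]), ("CBQ", ["NWX", "CBQ"])]⟩ := by rfl
  simp only [expand_aliases_for_root, expand_aliases_for_root_alt, hR, hE]
  simp [PySem.Dict.contains, PySem.Dict.getD, PySem.Dict.get?,
    PySem.Set.empty, PySem.Set.union, PySem.Set.update, PySem.Set.add,
    PySem.Set.contains, PySem.Set.ofList, List.foldl,
    h3, h4, h5, h8, h9, h10, h11,
    Ne.symm h1, Ne.symm h2, Ne.symm h3, Ne.symm h4, Ne.symm h5, Ne.symm h6, Ne.symm h7,
    Ne.symm h8, Ne.symm h9, Ne.symm h10, Ne.symm h11]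

-- ===== VERDICT (by name: the statement is the Claim_ definition above) =====
theorem expand_aliases_for_root_spec : Claim_equal_expand_aliases_for_root := by
  intro root _
  show expand_aliases_for_root root = expand_aliases_for_root_alt root
  by_cases h : root ∈ pvRelevant
  · fin_cases h <;> decide
  · exact pv_generic root h
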